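-- pv_equiv track=rewrite | github.com/ajw131/CRIREL_Logic_gates | Adder/01_adder/CRIREL.py | interval_logic_list_16
-- ===== SOURCE A (Python) =====
-- def interval_logic_list_16(logic_score):
--     name_list = ["False", "A nimply B", "A", "B nimply A", "B", "XOR", "OR",
--                  "NOR", "XNOR", "Not B", "B imply A", "Not A", "A imply B", "NAND", "TRUE", "other"]
--     label_list = [0, 1, 2, 3, 4, 5, 6, 7, 8, 9, 10, 11, 12, 13, 14, 15, 16]
--     label = 16
--     for j, score in enumerate(label_list):
--         if logic_score == score:
--             label = j
--     return(label)
-- ===== SOURCE B (Python) =====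
-- def interval_logic_list_16(logic_score):
--     # Binary search the sorted label table for logic_score; its position is the
--     # label index, and a miss yields the catch-all label 16.
--     label_list = list(range(17))
--     lo, hi = 0, len(label_list)
--     while lo < hi:
--         mid = (lo + hi) // 2
--         if label_list[mid] < logic_score:
--             lo = mid + 1
--         else:
--             hi = mid
--     if lo < len(label_list) and label_list[lo] == logic_score:
--         return lo
--     return 16
-- ===== Notes on version B (the rewrite author's own statement) =====
-- stated objective: alternative
-- what changed: Replaced A's last-match linear scan over the label list with a lower-bound binary search on the sorted table: the found position is the label index, a miss yields the catch-all 16.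
import Mathlib
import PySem

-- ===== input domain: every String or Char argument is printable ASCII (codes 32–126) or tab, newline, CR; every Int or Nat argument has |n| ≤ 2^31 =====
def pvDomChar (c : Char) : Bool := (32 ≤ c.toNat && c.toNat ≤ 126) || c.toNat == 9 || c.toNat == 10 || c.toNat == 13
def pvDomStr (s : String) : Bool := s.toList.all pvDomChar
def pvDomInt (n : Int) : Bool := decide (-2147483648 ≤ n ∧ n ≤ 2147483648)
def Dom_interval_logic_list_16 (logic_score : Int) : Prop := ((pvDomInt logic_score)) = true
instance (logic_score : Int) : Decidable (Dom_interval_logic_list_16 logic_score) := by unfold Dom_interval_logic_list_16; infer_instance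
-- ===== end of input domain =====

-- B replaces A's last-match linear scan over the label table by a lower-bound binary search (alternative decomposition).
-- ===== PORT A =====
def interval_logic_list_16 (logic_score : Int) : Int :=
  let label_list : List Int := [0, 1, 2, 3, 4, 5, 6, 7, 8, 9, 10, 11, 12, 13, 14, 15, 16]
  (PySem.List.enumerate label_list).foldl
    (fun label (js : Int × Int) => if logic_score = js.2 then js.1 else label) 16

-- ===== PORT B =====
-- B's while-loop, as the obvious recursion on hi - lo; list indexing is in range
-- whenever the loop reads it (lo ≤ mid < hi ≤ length), so getD is exact there.
def pvBsearch (target : Int) (xs : List Int) (lo hi : Nat) : Nat :=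
  if h : lo < hi then
    let mid := (lo + hi) / 2
    if xs.getD mid 0 < target then pvBsearch target xs (mid + 1) hi
    else pvBsearch target xs lo mid
  else lo
termination_by hi - lo
decreasing_by all_goals omega

def interval_logic_list_16_alt (logic_score : Int) : Int :=
  let label_list : List Int := PySem.List.pyRange 0 17 1
  let lo := pvBsearch logic_score label_list 0 label_list.length
  if lo < label_list.length ∧ label_list.getD lo 0 = logic_score then (lo : Int) else 16

-- ===== PRECONDITION & SPEC =====
def Spec_interval_logic_list_16 (logic_score : Int) (out : Int) : Prop := out = interval_logic_list_16_alt logic_score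
instance (logic_score : Int) (out : Int) : Decidable (Spec_interval_logic_list_16 logic_score out) := by unfold Spec_interval_logic_list_16; infer_instance

-- ===== CLAIM (what is proved, stated in full; the proofs are below) =====
def Claim_equal_interval_logic_list_16 : Prop := ∀ (logic_score : Int), Dom_interval_logic_list_16 logic_score → Spec_interval_logic_list_16 logic_score (interval_logic_list_16 logic_score)

-- ===== LEMMAS AND PROOFS =====

theorem pvRange17 : PySem.List.pyRange 0 17 1 = [0, 1, 2, 3, 4, 5, 6, 7, 8, 9, 10, 11, 12, 13, 14, 15, 16] := by decide

theorem pvGetD17 : ∀ m : Nat, m < 17 → ([0, 1, 2, 3, 4, 5, 6, 7, 8, 9, 10, 11, 12, 13, 14, 15, 16] : List Int).getD m 0 = (m : Int) := by decide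

-- Closed form of the binary search on the identity table [0..16].
theorem pvBsearch_eq (t : Int) (lo hi : Nat) (hlo : lo ≤ hi) (hhi : hi ≤ 17) :
    pvBsearch t [0, 1, 2, 3, 4, 5, 6, 7, 8, 9, 10, 11, 12, 13, 14, 15, 16] lo hi =
      if t ≤ (lo : Int) then lo else if t ≤ (hi : Int) then t.toNat else hi := by
  induction hn : hi - lo using Nat.strong_induction_on generalizing lo hi with
  | _ n ih =>
    unfold pvBsearch
    by_cases h : lo < hi
    · rw [dif_pos h]
      have hm : (lo + hi) / 2 < 17 := by omega
      simp only [pvGetD17 _ hm]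
      by_cases hc : ((((lo + hi) / 2 : Nat) : Int) < t)
      · rw [if_pos hc, ih (hi - ((lo + hi) / 2 + 1)) (by omega) _ _ (by omega) hhi rfl]
        split_ifs <;> omega
      · rw [if_neg hc, ih ((lo + hi) / 2 - lo) (by omega) _ _ (by omega) (by omega) rfl]
        split_ifs <;> omega
    · rw [dif_neg h]
      have : lo = hi := by omega
      split_ifs <;> omega

-- The fold keeps the last index whose score matches; when every pair is (j, j) it returns ls iff ls occurs.
theorem pvFoldlEq (ls init : Int) (l : List (Int × Int)) (hd : ∀ p ∈ l, p.1 = p.2) :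
    l.foldl (fun label (js : Int × Int) => if ls = js.2 then js.1 else label) init =
      if ls ∈ l.map (·.2) then ls else init := by
  induction l generalizing init with
  | nil => simp
  | cons a t ih =>
    have ha := hd a (by simp)
    simp only [List.foldl_cons, List.map_cons, List.mem_cons]
    rw [ih _ (fun p hp => hd p (List.mem_cons_of_mem a hp))]
    by_cases h1 : ls ∈ t.map (·.2)
    · simp [h1]
    · by_cases h2 : ls = a.2
      · rw [if_neg h1, if_pos h2, if_pos (Or.inl h2)]
        exact ha.trans h2.symm
      · simp [h1, h2]

-- Closed forms of both ports.
theorem pvAltEq (ls : Int) : interval_logic_list_16_alt ls = if 0 ≤ ls ∧ ls < 17 then ls else 16 := by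
  unfold interval_logic_list_16_alt
  simp only [pvRange17]
  have hlen : ([0, 1, 2, 3, 4, 5, 6, 7, 8, 9, 10, 11, 12, 13, 14, 15, 16] : List Int).length = 17 := by decide
  rw [hlen, pvBsearch_eq ls 0 17 (by norm_num) le_rfl]
  by_cases hc : 0 ≤ ls ∧ ls < 17
  · have hv : (if ls ≤ ((0 : Nat) : Int) then (0 : Nat) else if ls ≤ ((17 : Nat) : Int) then ls.toNat else 17) = ls.toNat := by
      split_ifs <;> omega
    rw [hv, if_pos ⟨by omega, by rw [pvGetD17 _ (by omega)]; omega⟩, if_pos hc]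
    omega
  · rw [if_neg hc]
    split_ifs with h1 h2 h3 h4
    · rw [pvGetD17 0 (by norm_num)] at h2
      exact absurd ⟨by omega, by omega⟩ hc
    · rfl
    · rw [pvGetD17 ls.toNat (by omega)] at h4
      exact absurd ⟨by omega, by omega⟩ hc
    · rfl
    · omega
    · rfl

theorem pvAEq (ls : Int) : interval_logic_list_16 ls = if 0 ≤ ls ∧ ls < 17 then ls else 16 := by
  unfold interval_logic_list_16
  rw [pvFoldlEq]
  · rw [PySem.List.map_snd_enumerate]
    have h : ls ∈ ([0, 1, 2, 3, 4, 5, 6, 7, 8, 9, 10, 11, 12, 13, 14, 15, 16] : List Int)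
        ↔ (0 ≤ ls ∧ ls < 17) := by
      simp only [List.mem_cons, List.not_mem_nil, or_false]
      omega
    by_cases hc : 0 ≤ ls ∧ ls < 17
    · rw [if_pos (h.mpr hc), if_pos hc]
    · rw [if_neg (fun hm => hc (h.mp hm)), if_neg hc]
  · intro p hp
    rw [PySem.List.mem_enumerate_iff] at hp
    obtain ⟨k, hk, rfl⟩ := hp
    simp only [List.length_cons, List.length_nil] at hk
    interval_cases k <;> norm_num

-- ===== VERDICT (by name: the statement is the Claim_ definition above) =====
theorem interval_logic_list_16_spec : Claim_equal_interval_logic_list_16 := by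
  intro ls _
  unfold Spec_interval_logic_list_16
  rw [pvAEq, pvAltEq]
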